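-- pv_equiv track=rewrite | github.com/harpsiford/smart-contract-model-setup | AMEVulDetector/pattern_extractor_example/extract_MLP_feature_refactor.py | split_function
-- ===== SOURCE A (Python) =====
-- def split_function(source_code):
--     function_list = []
--     flag = -1
--
--     for line in source_code.split('\n'):
--         text = line.strip()
--         if len(text) > 0 and text != "\n":
--             if text.split()[0] == "function" or text.split()[0] == "constructor":
--                 function_list.append([text])
--                 flag += 1
--             elif len(function_list) > 0 and ("function" or "constructor" in function_list[flag][0]):
--                 function_list[flag].append(text)
--     return function_list
-- ===== SOURCE B (Python) =====
-- def split_function(source_code):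
--     lines = [t for t in (l.strip() for l in source_code.split('\n')) if t]
--
--     def is_start(t):
--         return t.split()[0] in ("function", "constructor")
--
--     # Single reverse pass: collect lines into the pending block `cur`;
--     # a start line closes the block.  Lines before the first start line
--     # are left in `cur` at the end and dropped.
--     blocks = []
--     cur = []
--     for t in reversed(lines):
--         if is_start(t):
--             cur.append(t)
--             blocks.append(cur[::-1])
--             cur = []
--         else:
--             cur.append(t)
--     blocks.reverse()
--     return blocks
-- ===== Notes on version B (the rewrite author's own statement) =====
-- stated objective: alternative
-- what changed: Replaces A's stateful forward pass (a growing block list indexed through a separately maintained flag counter) by a pre-filtered line list scanned once in reverse with a single pending-block accumulator: a start line closes the pending block, and lines before the first start are dropped automatically because the pending block is discarded at the end.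
import Mathlib
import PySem

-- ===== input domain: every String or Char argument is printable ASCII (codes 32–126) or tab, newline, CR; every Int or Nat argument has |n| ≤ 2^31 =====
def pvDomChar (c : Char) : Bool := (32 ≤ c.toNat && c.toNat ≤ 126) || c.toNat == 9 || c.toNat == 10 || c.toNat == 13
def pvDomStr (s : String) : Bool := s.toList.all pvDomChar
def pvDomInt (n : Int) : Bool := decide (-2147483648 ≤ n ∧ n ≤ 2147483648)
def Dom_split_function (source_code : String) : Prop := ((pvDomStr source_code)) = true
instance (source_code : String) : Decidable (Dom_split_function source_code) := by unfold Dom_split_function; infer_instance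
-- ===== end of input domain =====

-- B replaces A's stateful forward pass (flag-indexed append into a growing block list) by a
-- pre-filtered line list scanned once in reverse with a single pending-block accumulator (objective: alternative).


-- ===== PORT A =====
-- text.split()[0]: A only evaluates it on a non-empty stripped line, whose split() is
-- non-empty, so headD "" is exact there.
def pvFirstWordA (text : String) : String := (PySem.Str.split₀ text).headD ""

-- function_list[flag].append(text): Python indexing with flag (A only reaches this with
-- flag = len(function_list) - 1 ≥ 0, where pyIdx? resolves; the none branch is unreachable).
def pvAppendAtA (fl : List (List String)) (flag : Int) (text : String) : List (List String) :=
  match PySem.List.pyIdx? fl.length flag with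
  | some i => fl.modify i (fun g => g ++ [text])
  | none => fl

-- one iteration of A's for-loop over the state (function_list, flag)
def pvStepA (st : List (List String) × Int) (line : String) : List (List String) × Int :=
  let text := PySem.Str.strip line
  if PySem.Str.len text > 0 && text != "\n" then
    if pvFirstWordA text == "function" || pvFirstWordA text == "constructor" then
      (st.1 ++ [[text]], st.2 + 1)
    else if st.1.length > 0 then
      -- Python's '("function" or "constructor" in function_list[flag][0])' is always truthy
      (pvAppendAtA st.1 st.2 text, st.2)
    else st
  else st

-- source_code.split('\n'): the separator is the non-empty literal "\n", so split? is always some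
def split_function (source_code : String) : List (List String) :=
  (((PySem.Str.split? source_code "\n").getD []).foldl pvStepA ([], -1)).1

-- ===== PORT B =====
def pvIsStartB (t : String) : Bool :=
  pvFirstWordA t == "function" || pvFirstWordA t == "constructor"

-- one iteration of B's reverse loop over the state (blocks, cur)
def pvStepB (st : List (List String) × List String) (t : String) : List (List String) × List String :=
  if pvIsStartB t then (st.1 ++ [(st.2 ++ [t]).reverse], [])
  else (st.1, st.2 ++ [t])

def split_function_alt (source_code : String) : List (List String) :=
  (((((((PySem.Str.split? source_code "\n").getD []).map PySem.Str.strip).filter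
      (fun t => t ≠ "")).reverse).foldl pvStepB ([], [])).1).reverse

-- ===== PRECONDITION & SPEC =====
def Spec_split_function (source_code : String) (out : List (List String)) : Prop := out = split_function_alt source_code
instance (source_code : String) (out : List (List String)) : Decidable (Spec_split_function source_code out) := by unfold Spec_split_function; infer_instance

-- ===== CLAIM (what is proved, stated in full; the proofs are below) =====
def Claim_equal_split_function : Prop := ∀ (source_code : String), Dom_split_function source_code → Spec_split_function source_code (split_function source_code)

-- ===== LEMMAS AND PROOFS =====

-- the stripped, non-empty lines (the list both programs effectively work on)
def pvKept (ls : List String) : List String :=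
  (ls.map PySem.Str.strip).filter (fun t => t ≠ "")

def pvNeg (t : String) : Bool := !pvIsStartB t

-- common specification: one block per start line, carrying the non-start lines following it
def pvChunk : List String → List (List String)
  | [] => []
  | t :: r =>
    if pvIsStartB t then (t :: r.takeWhile pvNeg) :: pvChunk (r.dropWhile pvNeg)
    else pvChunk r
termination_by ts => ts.length
decreasing_by
  · have := List.length_dropWhile_le (p := pvNeg) (l := r); simp; omega
  · simp

-- append xs to the last block (what A's function_list[flag].append does under A's invariant)
def pvExtLast (fl : List (List String)) (xs : List String) : List (List String) :=
  match fl with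
  | [] => []
  | [g] => [g ++ xs]
  | g :: r => g :: pvExtLast r xs

lemma pvExtLast_cons (g : List String) (r : List (List String)) (xs : List String) :
    pvExtLast (g :: r) xs = if r = [] then [g ++ xs] else g :: pvExtLast r xs := by
  cases r <;> rfl

lemma pvExtLast_length (fl : List (List String)) (xs : List String) :
    (pvExtLast fl xs).length = fl.length := by
  induction fl with
  | nil => rfl
  | cons g r ih => rw [pvExtLast_cons]; split_ifs with h <;> simp_all

lemma pvExtLast_ne_nil (fl : List (List String)) (xs : List String) (h : fl ≠ []) :
    pvExtLast fl xs ≠ [] := by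
  intro hc
  apply h
  have hlen := pvExtLast_length fl xs
  rw [hc] at hlen
  exact List.length_eq_zero_iff.mp hlen.symm

lemma pvExtLast_nil (fl : List (List String)) : pvExtLast fl [] = fl := by
  induction fl with
  | nil => rfl
  | cons g r ih => rw [pvExtLast_cons]; split_ifs with h <;> simp_all

lemma pvExtLast_append (fl : List (List String)) (g : List String) (xs : List String) :
    pvExtLast (fl ++ [g]) xs = fl ++ [g ++ xs] := by
  induction fl with
  | nil => rfl
  | cons a r ih => rw [List.cons_append, pvExtLast_cons]; simp_all

lemma pvExtLast_extLast (fl : List (List String)) (xs ys : List String) :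
    pvExtLast (pvExtLast fl xs) ys = pvExtLast fl (xs ++ ys) := by
  induction fl with
  | nil => rfl
  | cons g r ih =>
    rw [pvExtLast_cons]
    split_ifs with h
    · subst h; simp [pvExtLast]
    · rw [pvExtLast_cons, if_neg (pvExtLast_ne_nil r xs h), ih,
        pvExtLast_cons, if_neg h]

-- modifying the last index appends to the last block
lemma pvModify_last (fl : List (List String)) (t : String) (h : fl ≠ []) :
    fl.modify (fl.length - 1) (fun g => g ++ [t]) = pvExtLast fl [t] := by
  induction fl with
  | nil => simp at h
  | cons g r ih =>
    cases r with
    | nil => rfl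
    | cons b c =>
      have hlen : (g :: b :: c).length - 1 = (b :: c).length - 1 + 1 := by simp
      rw [hlen, List.modify_succ_cons, ih (List.cons_ne_nil b c),
        pvExtLast_cons g (b :: c) [t], if_neg (List.cons_ne_nil b c)]

-- A's append-at-flag is an append to the last block when flag = length - 1 on a non-empty list
lemma pvAppendAtA_last (fl : List (List String)) (t : String) (h : fl ≠ []) :
    pvAppendAtA fl ((fl.length : Int) - 1) t = pvExtLast fl [t] := by
  have hpos : 0 < fl.length := List.length_pos_iff.mpr h
  unfold pvAppendAtA
  rw [PySem.List.pyIdx?]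
  rw [if_pos (by omega), if_pos (by omega)]
  have htn : ((fl.length : Int) - 1).toNat = fl.length - 1 := by omega
  rw [htn]
  exact pvModify_last fl t h

lemma pvChunk_dropWhile (ts : List String) : pvChunk (ts.dropWhile pvNeg) = pvChunk ts := by
  induction ts with
  | nil => rfl
  | cons t r ih =>
    by_cases h : pvIsStartB t
    · simp [List.dropWhile, pvNeg, h]
    · rw [List.dropWhile_cons_of_pos (by simp [pvNeg, h]), ih]
      rw [pvChunk, if_neg h]

-- the stripped line is never the string "\n" (strip removes trailing whitespace)
lemma pvStrip_ne_newline (line : String) : PySem.Str.strip line ≠ "\n" := by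
  intro h
  have h2 : (PySem.Str.strip line).toList = ("\n" : String).toList := by rw [h]
  rw [PySem.Str.toList_strip] at h2
  unfold PySem.Chars.strip PySem.Chars.rstrip at h2
  have h3 : List.dropWhile PySem.Chars.isspace (PySem.Chars.lstrip line.toList).reverse
      = ['\n'] := by
    have := congrArg List.reverse h2
    simpa using this
  have hne : List.dropWhile PySem.Chars.isspace (PySem.Chars.lstrip line.toList).reverse ≠ [] := by
    rw [h3]; simp
  have h4 := List.head_dropWhile_not PySem.Chars.isspace hne
  have h5 : (List.dropWhile PySem.Chars.isspace (PySem.Chars.lstrip line.toList).reverse).head hne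
      = '\n' := by simp [h3]
  rw [h5] at h4
  exact absurd h4 (by decide)

-- a non-empty stripped line has positive length
lemma pvStripLen_pos (l : String) (h : PySem.Str.strip l ≠ "") :
    0 < (PySem.Chars.strip l.toList).length := by
  have hne : (PySem.Str.strip l).toList ≠ [] :=
    fun hc => h (String.toList_eq_nil_iff.mp hc)
  rw [PySem.Str.toList_strip] at hne
  exact List.length_pos_iff.mpr hne

-- pvKept distributes over cons
lemma pvKept_cons (l : String) (r : List String) :
    pvKept (l :: r) =
      if PySem.Str.strip l = "" then pvKept r else PySem.Str.strip l :: pvKept r := by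
  unfold pvKept
  by_cases h : PySem.Str.strip l = "" <;> simp [h]

-- evaluating one iteration of A's loop: a blank line
lemma pvStepA_skip (st : List (List String) × Int) (l : String)
    (h : PySem.Str.strip l = "") : pvStepA st l = st := by
  simp [pvStepA, h]

-- evaluating one iteration of A's loop: a start line
lemma pvStepA_start (st : List (List String) × Int) (l : String)
    (h : PySem.Str.strip l ≠ "") (hst : pvIsStartB (PySem.Str.strip l) = true) :
    pvStepA st l = (st.1 ++ [[PySem.Str.strip l]], st.2 + 1) := by
  unfold pvIsStartB at hst
  simp [pvStepA, hst, pvStripLen_pos l h, pvStrip_ne_newline l]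

-- evaluating one iteration of A's loop: a continuation line
lemma pvStepA_cont (st : List (List String) × Int) (l : String)
    (h : PySem.Str.strip l ≠ "") (hst : pvIsStartB (PySem.Str.strip l) = false) :
    pvStepA st l =
      if st.1.length > 0 then (pvAppendAtA st.1 st.2 (PySem.Str.strip l), st.2) else st := by
  unfold pvIsStartB at hst
  simp [pvStepA, hst, pvStripLen_pos l h, pvStrip_ne_newline l]

-- characterisation of A's loop: the invariant flag = len(function_list) - 1 is carried along
lemma pvFoldA (ls : List String) (fl : List (List String)) :
    (ls.foldl pvStepA (fl, (fl.length : Int) - 1)).1 =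
      if fl = [] then pvChunk (pvKept ls)
      else pvExtLast fl ((pvKept ls).takeWhile pvNeg) ++ pvChunk ((pvKept ls).dropWhile pvNeg) := by
  induction ls generalizing fl with
  | nil =>
    simp only [List.foldl_nil, pvKept]
    split_ifs with h
    · simp [pvChunk, h]
    · simp [pvExtLast_nil, pvChunk]
  | cons l r ih =>
    rw [List.foldl_cons]
    by_cases hs : PySem.Str.strip l = ""
    · rw [pvStepA_skip _ l hs, pvKept_cons, if_pos hs]
      exact ih fl
    · rw [pvKept_cons, if_neg hs]
      set t := PySem.Str.strip l with ht
      by_cases hstart : pvIsStartB t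
      · -- a new block starts
        rw [pvStepA_start _ l hs hstart]
        have hflag : (((fl.length : Int) - 1) + 1) = (((fl ++ [[t]]).length : Int) - 1) := by
          simp
        rw [show ((fl, (fl.length : Int) - 1).1 ++ [[t]], (fl, (fl.length : Int) - 1).2 + 1)
              = (fl ++ [[t]], ((fl ++ [[t]]).length : Int) - 1) from by rw [← hflag]]
        rw [ih (fl ++ [[t]])]
        rw [if_neg (by simp), pvExtLast_append]
        by_cases hfl : fl = []
        · subst hfl
          rw [if_pos rfl, pvChunk, if_pos hstart]
          simp
        · rw [if_neg hfl]
          rw [List.takeWhile_cons_of_neg (by simp [pvNeg, hstart]),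
              List.dropWhile_cons_of_neg (by simp [pvNeg, hstart])]
          rw [pvExtLast_nil, pvChunk, if_pos hstart]
          simp
      · -- a continuation line
        rw [pvStepA_cont _ l hs (by simpa using hstart)]
        by_cases hfl : fl = []
        · subst hfl
          rw [if_neg (by simp), ih [], if_pos rfl, if_pos rfl, pvChunk, if_neg hstart]
        · rw [if_pos (by simpa [List.length_pos_iff] using hfl)]
          simp only
          rw [pvAppendAtA_last fl t hfl]
          rw [show ((pvExtLast fl [t], (fl.length : Int) - 1) :
                List (List String) × Int)
              = (pvExtLast fl [t], (((pvExtLast fl [t]).length : Int) - 1)) from by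
            rw [pvExtLast_length]]
          rw [ih (pvExtLast fl [t])]
          rw [if_neg (pvExtLast_ne_nil fl [t] hfl), if_neg hfl]
          rw [List.takeWhile_cons_of_pos (by simp [pvNeg, hstart]),
              List.dropWhile_cons_of_pos (by simp [pvNeg, hstart])]
          rw [pvExtLast_extLast]
          rfl

-- characterisation of B's loop on the kept lines
lemma pvFoldB (ks : List String) :
    ks.reverse.foldl pvStepB ([], []) =
      ((pvChunk ks).reverse, (ks.takeWhile pvNeg).reverse) := by
  induction ks with
  | nil => simp [pvChunk]
  | cons t r ih =>
    rw [List.reverse_cons, List.foldl_concat, ih]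
    unfold pvStepB
    by_cases h : pvIsStartB t
    · rw [if_pos h, pvChunk, if_pos h,
        List.takeWhile_cons_of_neg (by simp [pvNeg, h]), pvChunk_dropWhile]
      simp
    · rw [if_neg h, pvChunk, if_neg h,
        List.takeWhile_cons_of_pos (by simp [pvNeg, h])]
      simp

-- ===== VERDICT (by name: the statement is the Claim_ definition above) =====
theorem split_function_spec : Claim_equal_split_function := by
  intro s _
  unfold Spec_split_function split_function split_function_alt
  have hA : ((((PySem.Str.split? s "\n").getD []).foldl pvStepA ([], -1)).1)
      = pvChunk (pvKept ((PySem.Str.split? s "\n").getD [])) := by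
    have h := pvFoldA ((PySem.Str.split? s "\n").getD []) []
    simpa using h
  rw [hA]
  have hB := pvFoldB (pvKept ((PySem.Str.split? s "\n").getD []))
  unfold pvKept at hB
  rw [hB, List.reverse_reverse]
  rfl
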